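-- pv_equiv track=rewrite | github.com/M1k3Ha/Imathiatour | api/app/wikidata.py | _pick_lang
-- ===== SOURCE A (Python) =====
-- from typing import Optional
--
-- def _pick_lang(d: dict, preferred=("el", "en")) -> Optional[str]:
--     # d like: {"en": {"language":"en","value":"..."}, "el": {...}}
--     for lang in preferred:
--         if lang in d and isinstance(d[lang], dict) and "value" in d[lang]:
--             return d[lang]["value"]
--     # fallback: first value
--     for v in d.values():
--         if isinstance(v, dict) and "value" in v:
--             return v["value"]
--     return None
-- ===== SOURCE B (Python) =====
-- from typing import Optional
--
-- def _pick_lang(d: dict, preferred=("el", "en")) -> Optional[str]: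
--     # single pass over d: keep the usable value whose key has the smallest
--     # preferred-index (argmin accumulator), plus the first usable value as fallback
--     best = None       # (index in preferred, value), smallest index seen so far
--     fallback = None   # first usable value in d, in insertion order
--     for k, v in d.items():
--         if isinstance(v, dict) and "value" in v:
--             s = v["value"]
--             if fallback is None:
--                 fallback = s
--             if k in preferred:
--                 i = preferred.index(k)
--                 if best is None or i < best[0]:
--                     best = (i, s)
--     return best[1] if best is not None else fallback
-- ===== Notes on version B (the rewrite author's own statement) =====
-- stated objective: alternative
-- what changed: Replaces A's two staged scans (early-return loop over preferred, then fallback scan over d.values()) by one argmin pass over d.items() that accumulates the usable value with the smallest preferred-index together with the first usable fallback value, deciding only after the loop.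
import Mathlib
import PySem

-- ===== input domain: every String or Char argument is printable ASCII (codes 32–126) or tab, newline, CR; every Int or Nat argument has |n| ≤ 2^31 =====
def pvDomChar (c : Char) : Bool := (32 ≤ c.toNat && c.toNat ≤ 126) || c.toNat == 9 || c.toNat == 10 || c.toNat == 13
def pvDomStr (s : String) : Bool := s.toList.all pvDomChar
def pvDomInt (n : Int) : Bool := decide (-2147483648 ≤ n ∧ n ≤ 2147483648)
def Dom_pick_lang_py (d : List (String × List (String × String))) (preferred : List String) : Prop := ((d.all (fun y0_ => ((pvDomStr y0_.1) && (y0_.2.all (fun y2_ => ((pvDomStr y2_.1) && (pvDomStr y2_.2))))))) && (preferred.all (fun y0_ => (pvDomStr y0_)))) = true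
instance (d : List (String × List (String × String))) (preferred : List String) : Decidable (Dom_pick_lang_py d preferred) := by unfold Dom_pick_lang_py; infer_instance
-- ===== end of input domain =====

-- B replaces A's two staged early-return scans by one argmin pass over d that keeps the
-- usable value with the smallest preferred-index plus the first usable fallback value
-- (objective: alternative decomposition); return value only, no mutation involved.

-- ===== PORT A =====
-- first loop of A: 'for lang in preferred: if lang in d and "value" in d[lang]: return d[lang]["value"]'
def pickPrefA (d : List (String × List (String × String))) : List String → Option String
  | [] => none
  | lang :: rest =>
    match d.lookup lang with
    | some v =>
      match v.lookup "value" with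
      | some s => some s
      | none => pickPrefA d rest
    | none => pickPrefA d rest

-- fallback loop of A: 'for v in d.values(): if "value" in v: return v["value"]'
def pickFallA : List (List (String × String)) → Option String
  | [] => none
  | v :: rest =>
    match v.lookup "value" with
    | some s => some s
    | none => pickFallA rest

def pick_lang_py (d : List (String × List (String × String))) (preferred : List String) : Option String :=
  match pickPrefA d preferred with
  | some s => some s
  | none => pickFallA (d.map Prod.snd)

-- ===== PORT B =====
-- body of B's single loop: update (best, fallback) with one item (k, v) of d
def bStep (preferred : List String) (st : Option (Nat × String) × Option String)
    (kv : String × List (String × String)) : Option (Nat × String) × Option String :=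
  match kv.2.lookup "value" with
  | none => st
  | some s =>
    let fallback := if st.2.isNone then some s else st.2
    let best :=
      if preferred.contains kv.1 then
        match PySem.List.index? preferred kv.1 with
        | some i =>
          match st.1 with
          | none => some (i, s)
          | some b => if i < b.1 then some (i, s) else st.1
        | none => st.1  -- unreachable: 'preferred.index' is guarded by 'k in preferred'
      else st.1
    (best, fallback)

def pick_lang_py_alt (d : List (String × List (String × String))) (preferred : List String) : Option String :=
  let r := d.foldl (bStep preferred) (none, none)
  match r.1 with
  | some b => some b.2
  | none => r.2

-- ===== PRECONDITION & SPEC =====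
-- Pre_ excludes association lists with duplicate keys: a Python dict never has them, and on
-- such lists the two ports may see different entries for the same key.
def Pre_pick_lang_py (d : List (String × List (String × String))) (preferred : List String) : Prop :=
  (d.map Prod.fst).Nodup
instance (d : List (String × List (String × String))) (preferred : List String) : Decidable (Pre_pick_lang_py d preferred) := by unfold Pre_pick_lang_py; infer_instance
def pvWitness_pick_lang_py : (List (String × List (String × String))) × List String :=
  ([("en", [("language", "en"), ("value", "hello")]), ("fr", [("value", "bonjour")])], ["el", "en"])

def Spec_pick_lang_py (d : List (String × List (String × String))) (preferred : List String) (out : Option String) : Prop := out = pick_lang_py_alt d preferred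
instance (d : List (String × List (String × String))) (preferred : List String) (out : Option String) : Decidable (Spec_pick_lang_py d preferred out) := by unfold Spec_pick_lang_py; infer_instance

-- ===== CLAIM (what is proved, stated in full; the proofs are below) =====
def Claim_equal_pick_lang_py : Prop := ∀ (d : List (String × List (String × String))) (preferred : List String), Dom_pick_lang_py d preferred → Pre_pick_lang_py d preferred → Spec_pick_lang_py d preferred (pick_lang_py d preferred)

-- ===== LEMMAS AND PROOFS =====

-- the usable candidates of d: (key, value-string) of the entries carrying a "value"
def cands (d : List (String × List (String × String))) : List (String × String) :=
  d.filterMap (fun kv => (kv.2.lookup "value").map (fun s => (kv.1, s)))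

-- B's best-accumulator update, on a candidate
def bupd (preferred : List String) (b : Option (Nat × String)) (c : String × String) : Option (Nat × String) :=
  if preferred.contains c.1 then
    match PySem.List.index? preferred c.1 with
    | some i =>
      match b with
      | none => some (i, c.2)
      | some bb => if i < bb.1 then some (i, c.2) else b
    | none => b
  else b

def bestAux (preferred : List String) (b : Option (Nat × String)) (cs : List (String × String)) : Option (Nat × String) :=
  cs.foldl (bupd preferred) b

-- fallback accumulator
def fbAux (f : Option String) (cs : List (String × String)) : Option String :=
  cs.foldl (fun f c => if f.isNone then some c.2 else f) f

-- first lang of preferred having a candidate (reference scan both sides are reduced to)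
def firstPref (cs : List (String × String)) : List String → Option String
  | [] => none
  | l :: rest =>
    match cs.lookup l with
    | some s => some s
    | none => firstPref cs rest

theorem foldl_bStep_eq (preferred : List String) (d : List (String × List (String × String))) :
    ∀ st, d.foldl (bStep preferred) st = (bestAux preferred st.1 (cands d), fbAux st.2 (cands d)) := by
  induction d with
  | nil => intro st; rfl
  | cons kv rest ih =>
    intro st
    simp only [List.foldl_cons, cands, List.filterMap_cons]
    cases h : kv.2.lookup "value" with
    | none => simpa [bStep, h, cands] using ih st
    | some s =>
      simp only [Option.map_some]
      rw [ih]
      simp [bStep, bestAux, fbAux, bupd, h, cands]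

theorem fbAux_some (s : String) (cs : List (String × String)) : fbAux (some s) cs = some s := by
  induction cs with
  | nil => rfl
  | cons c rest ih =>
    have h1 : fbAux (some s) (c :: rest) = fbAux (some s) rest := rfl
    rw [h1]; exact ih

theorem fbAux_none_eq_head (cs : List (String × String)) :
    fbAux none cs = cs.head?.map Prod.snd := by
  cases cs with
  | nil => rfl
  | cons c rest =>
    have h1 : fbAux none (c :: rest) = fbAux (some c.2) rest := rfl
    rw [h1, fbAux_some]; rfl

theorem pickFallA_eq (d : List (String × List (String × String))) :
    pickFallA (d.map Prod.snd) = (cands d).head?.map Prod.snd := by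
  induction d with
  | nil => rfl
  | cons kv rest ih =>
    simp only [List.map_cons, pickFallA, cands, List.filterMap_cons]
    cases h : kv.2.lookup "value" with
    | none => simpa [cands] using ih
    | some s => simp

theorem lookup_none_not_key {l : String} {cs : List (String × String)}
    (h : cs.lookup l = none) : ∀ p ∈ cs, p.1 ≠ l := by
  intro p hp hpl
  have hb := List.lookup_eq_none_iff.mp h p hp
  rw [hpl] at hb
  simp at hb

theorem lookup_not_mem {l : String} {cs : List (String × String)}
    (h : l ∉ cs.map Prod.fst) : cs.lookup l = none := by
  refine List.lookup_eq_none_iff.mpr (fun p hp => ?_)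
  refine bne_iff_ne.mpr (fun he => h ?_)
  exact he ▸ List.mem_map.mpr ⟨p, hp, rfl⟩

-- keeping an already-minimal (index 0) best
theorem bestAux_keep_zero (l : String) (rest : List String) (s : String) (cs : List (String × String)) :
    bestAux (l :: rest) (some (0, s)) cs = some (0, s) := by
  induction cs with
  | nil => rfl
  | cons c cs' ih =>
    simp only [bestAux, List.foldl_cons] at *
    have : bupd (l :: rest) (some (0, s)) c = some (0, s) := by
      unfold bupd
      split_ifs with hc
      · cases hi : PySem.List.index? (l :: rest) c.1 <;> simp
      · rfl
    rw [this]; exact ih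

-- before an l-candidate is seen, the best index is never 0 unless the key is l itself
theorem bestAux_found (l : String) (rest : List String) (s : String) :
    ∀ (cs : List (String × String)) (b : Option (Nat × String)),
    (b = none ∨ ∃ bb, b = some bb ∧ 1 ≤ bb.1) →
    cs.lookup l = some s →
    bestAux (l :: rest) b cs = some (0, s) := by
  intro cs
  induction cs with
  | nil => intro b _ h; simp [List.lookup] at h
  | cons c cs' ih =>
    obtain ⟨ck, cv⟩ := c
    intro b hb h
    by_cases hkl : l = ck
    · subst hkl
      have hs : cv = s := by
        rw [List.lookup_cons_self] at h
        exact Option.some.injEq _ _ ▸ h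
      rw [hs]
      have hidx : PySem.List.index? (l :: rest) l = some 0 := PySem.List.index?_cons_self l rest
      have hcont : ((l :: rest).contains l) = true := by simp
      have hstep : bupd (l :: rest) b (l, s) = some (0, s) := by
        unfold bupd
        rcases hb with rfl | ⟨bb, rfl, hbb⟩
        · simp only [hcont, hidx, if_true]
        · have h0 : 0 < bb.1 := Nat.lt_of_lt_of_le Nat.zero_lt_one hbb
          simp only [hcont, hidx, if_true, h0]
      simp only [bestAux, List.foldl_cons, hstep]
      exact bestAux_keep_zero l rest s cs'
    · have hbe : (l == ck) = false := beq_eq_false_iff_ne.mpr hkl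
      have h' : cs'.lookup l = some s := by
        simpa [List.lookup, hbe] using h
      have hinv : bupd (l :: rest) b (ck, cv) = none ∨
          ∃ bb, bupd (l :: rest) b (ck, cv) = some bb ∧ 1 ≤ bb.1 := by
        unfold bupd
        split_ifs with hc
        · have hne' : l ≠ ck := hkl
          rw [show PySem.List.index? (l :: rest) (ck, cv).1
                = (PySem.List.index? rest (ck, cv).1).map (· + 1) from
              PySem.List.index?_cons_of_ne rest hne']
          cases hj : PySem.List.index? rest (ck, cv).1 with
          | none => simpa using hb
          | some j =>
            simp only [Option.map_some]
            rcases hb with rfl | ⟨bb, rfl, hbb⟩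
            · exact Or.inr ⟨(j + 1, cv), rfl, by omega⟩
            · by_cases hlt : j + 1 < bb.1
              · simp only [hlt, if_true]
                exact Or.inr ⟨(j + 1, cv), rfl, by omega⟩
              · simp only [hlt, if_false]
                exact Or.inr ⟨bb, rfl, hbb⟩
        · exact hb
      simp only [bestAux, List.foldl_cons]
      exact ih (bupd (l :: rest) b (ck, cv)) hinv h'

-- if no candidate has key l, the scan against (l :: rest) is the scan against rest, shifted by one
theorem bestAux_shift (l : String) (rest : List String) :
    ∀ (cs : List (String × String)), (∀ p ∈ cs, p.1 ≠ l) →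
    ∀ (b : Option (Nat × String)),
    bestAux (l :: rest) (b.map (fun p => (p.1 + 1, p.2))) cs
      = (bestAux rest b cs).map (fun p => (p.1 + 1, p.2)) := by
  intro cs
  induction cs with
  | nil => intro _ b; rfl
  | cons c cs' ih =>
    intro hk b
    have hne : c.1 ≠ l := hk c List.mem_cons_self
    have h1 : (l == c.1) = false := beq_eq_false_iff_ne.mpr (fun h => hne h.symm)
    have h2 : (c.1 == l) = false := beq_eq_false_iff_ne.mpr hne
    have hstep : bupd (l :: rest) (b.map (fun p => (p.1 + 1, p.2))) c
        = (bupd rest b c).map (fun p => (p.1 + 1, p.2)) := by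
      unfold bupd
      have hcont : ((l :: rest).contains c.1) = rest.contains c.1 := by
        simp only [List.contains_cons, h2, Bool.false_or]
      rw [hcont]
      split_ifs with hc
      · rw [show PySem.List.index? (l :: rest) c.1
              = (PySem.List.index? rest c.1).map (· + 1) from
            PySem.List.index?_cons_of_ne rest (fun h => hne h.symm)]
        cases hj : PySem.List.index? rest c.1 with
        | none => simp
        | some j =>
          cases b with
          | none => simp
          | some bb =>
            simp only [Option.map_some]
            by_cases hlt : j < bb.1
            · have : j + 1 < bb.1 + 1 := by omega
              simp [this, hlt]
            · have : ¬ j + 1 < bb.1 + 1 := by omega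
              simp [this, hlt]
      · rfl
    simp only [bestAux, List.foldl_cons, hstep]
    exact ih (fun p hp => hk p (List.mem_cons_of_mem _ hp)) (bupd rest b c)

-- B's argmin scan computes the first preferred language that has a candidate
theorem bestAux_spec (preferred : List String) (cs : List (String × String)) :
    (bestAux preferred none cs).map Prod.snd = firstPref cs preferred := by
  induction preferred with
  | nil =>
    have : bestAux [] none cs = none := by
      induction cs with
      | nil => rfl
      | cons c cs' ih => simpa [bestAux, bupd] using ih
    simp [this, firstPref]
  | cons l rest ih =>
    simp only [firstPref]
    cases h : cs.lookup l with
    | some s => rw [bestAux_found l rest s cs none (Or.inl rfl) h]; rfl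
    | none =>
      have hshift := bestAux_shift l rest cs (lookup_none_not_key h) none
      simp only [Option.map_none] at hshift
      rw [hshift, ← ih]
      cases bestAux rest none cs <;> rfl

-- candidate keys come from d's keys
theorem cands_keys_sub {d : List (String × List (String × String))} :
    ∀ p ∈ cands d, p.1 ∈ d.map Prod.fst := by
  intro p hp
  rcases List.mem_filterMap.mp hp with ⟨kv, hkv, hf⟩
  cases hs : kv.2.lookup "value" with
  | none => rw [hs] at hf; simp at hf
  | some s =>
    rw [hs] at hf
    simp only [Option.map_some, Option.some.injEq] at hf
    rw [← hf]
    exact List.mem_map.mpr ⟨kv, hkv, rfl⟩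

-- with nodup keys, candidate lookup factors through d's lookup
theorem cands_lookup (l : String) (d : List (String × List (String × String)))
    (hnd : (d.map Prod.fst).Nodup) :
    (cands d).lookup l = (d.lookup l).bind (fun v => v.lookup "value") := by
  induction d with
  | nil => rfl
  | cons kv rest ih =>
    obtain ⟨k, v⟩ := kv
    simp only [List.map_cons, List.nodup_cons] at hnd
    cases hv : v.lookup "value" with
    | some s =>
      have hc : cands ((k, v) :: rest) = (k, s) :: cands rest := by
        simp [cands, List.filterMap_cons, hv]
      rw [hc]
      by_cases hkl : l = k
      · subst hkl
        simp [List.lookup_cons_self, hv]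
      · have hbe : (l == k) = false := beq_eq_false_iff_ne.mpr hkl
        have hL : List.lookup l ((k, s) :: cands rest) = List.lookup l (cands rest) := by
          simp [List.lookup, hbe]
        have hR : List.lookup l ((k, v) :: rest) = List.lookup l rest := by
          simp [List.lookup, hbe]
        rw [hL, hR, ih hnd.2]
    | none =>
      have hc : cands ((k, v) :: rest) = cands rest := by
        simp [cands, List.filterMap_cons, hv]
      rw [hc]
      by_cases hkl : l = k
      · subst hkl
        have hnm : l ∉ (cands rest).map Prod.fst := fun hm => by
          rcases List.mem_map.mp hm with ⟨p, hp, hpl⟩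
          exact hnd.1 (hpl ▸ cands_keys_sub p hp)
        rw [lookup_not_mem hnm]
        simp [List.lookup_cons_self, hv]
      · have hbe : (l == k) = false := beq_eq_false_iff_ne.mpr hkl
        have hR : List.lookup l ((k, v) :: rest) = List.lookup l rest := by
          simp [List.lookup, hbe]
        rw [hR, ih hnd.2]

-- A's preferred loop equals the reference scan over the candidates
theorem pickPrefA_eq (d : List (String × List (String × String))) (preferred : List String)
    (hnd : (d.map Prod.fst).Nodup) :
    pickPrefA d preferred = firstPref (cands d) preferred := by
  induction preferred with
  | nil => rfl
  | cons l rest ih =>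
    simp only [pickPrefA, firstPref, cands_lookup l d hnd]
    cases hl : d.lookup l with
    | none => simpa using ih
    | some v =>
      cases hv : v.lookup "value" with
      | none => simpa [hv] using ih
      | some s => simp [hv]

-- ===== VERDICT (by name: the statement is the Claim_ definition above) =====
theorem pick_lang_py_spec : Claim_equal_pick_lang_py := by
  intro d preferred _ hpre
  show pick_lang_py d preferred = pick_lang_py_alt d preferred
  unfold pick_lang_py pick_lang_py_alt
  rw [foldl_bStep_eq preferred d (none, none)]
  simp only []
  rw [pickPrefA_eq d preferred hpre, ← bestAux_spec preferred (cands d), fbAux_none_eq_head,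
    ← pickFallA_eq d]
  cases bestAux preferred none (cands d) <;> rfl
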